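-- pv_equiv track=rewrite | github.com/Nelchois/Question-solve | PROLV_2/PRO131127.py | solution
-- ===== SOURCE A (Python) =====
-- def solution(want, number, discount):
--     answer = 0
--     want_dict = {f"{name}": i for i, name in enumerate(want)}
--     idx = 0
--     number = tuple(number)
--     while idx + 10 <= len(discount):
--         ck_list = list(number)
--         for i in range(idx, idx + 10):
--             pro = discount[i]
--             if pro in want_dict:
--                 if ck_list[want_dict[pro]] > 0:
--                     ck_list[want_dict[pro]] -= 1
--                 else:
--                     break
--             else:
--                 break
--         if sum(ck_list) == 0:
--             answer += 1
--         idx += 1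
--     return answer
-- ===== SOURCE B (Python) =====
-- def solution(want, number, discount):
--     # Sliding-window two-pointer scan: the consumed segment [l, r) and its
--     # remaining capacities `rem` are carried from one start day to the next,
--     # instead of re-simulating each 10-day window from scratch.
--     pos = {name: i for i, name in enumerate(want)}
--     S = sum(number)
--     n = len(discount)
--     rem = list(number)  # remaining capacity over the current segment [l, r)
--     answer = 0
--     r = 0
--     for l in range(n - 9):
--         if r < l:
--             r = l
--         while r < n:
--             j = pos.get(discount[r])
--             if j is None or rem[j] <= 0:
--                 break
--             rem[j] -= 1
--             r += 1
--         if min(r - l, 10) == S: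
--             answer += 1
--         if r > l:
--             rem[pos[discount[l]]] += 1
--     return answer
-- ===== Notes on version B (the rewrite author's own statement) =====
-- stated objective: faster
-- what changed: A re-simulates every 10-day window from a fresh copy of the quantity list and re-sums it per window; B slides a two-pointer consumed segment [l, r) across discount, carrying remaining capacities from one start day to the next and giving one unit back when the left end moves, so each day is consumed/released at most once per pointer and no per-window copy or sum is made.
-- outside the precondition, e.g. on solution(['a', 'b'], [1], ['x', 'x', 'x', 'x', 'x', 'x', 'x', 'x', 'x', 'x']): A returns 0, B returns 0
import Mathlib
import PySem

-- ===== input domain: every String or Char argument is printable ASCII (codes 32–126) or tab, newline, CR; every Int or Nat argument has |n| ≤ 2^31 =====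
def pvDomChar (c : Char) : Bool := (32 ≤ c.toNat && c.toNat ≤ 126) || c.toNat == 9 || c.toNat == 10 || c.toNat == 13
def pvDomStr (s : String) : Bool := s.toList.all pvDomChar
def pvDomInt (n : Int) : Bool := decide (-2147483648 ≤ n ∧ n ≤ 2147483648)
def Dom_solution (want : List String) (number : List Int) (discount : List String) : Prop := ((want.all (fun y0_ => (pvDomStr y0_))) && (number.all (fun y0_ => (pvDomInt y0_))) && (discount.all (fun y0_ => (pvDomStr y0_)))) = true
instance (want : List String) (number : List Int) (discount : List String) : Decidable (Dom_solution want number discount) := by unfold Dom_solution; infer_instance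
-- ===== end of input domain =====

-- B replaces A's per-start-day re-simulation of each 10-day window (which copies
-- and re-sums the whole quantity list per window) by a two-pointer sliding scan
-- that carries the consumed segment and its remaining capacities from one start
-- day to the next (objective: faster; measured faster in a timing run).

-- ===== PORT A =====

-- helper shared by both ports: want_dict / pos = {name: i for i, name in enumerate(want)}
def wantDict (want : List String) : PySem.Dict String Int :=
  (PySem.List.enumerate want 0).foldl (fun d p => d.insert p.2 p.1) PySem.Dict.empty

-- A's inner 'for i in range(idx, idx+10)' loop with its two breaks
def innerA (discount : List String) (wd : PySem.Dict String Int)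
    (ck : List Int) : List Int → List Int
  | [] => ck
  | i :: rest =>
    match PySem.List.pyGet? discount i with
    | none => ck          -- IndexError; unreachable: every i of the range is < len(discount)
    | some pro =>
      match wd.get? pro with
      | none => ck        -- 'else: break'
      | some j =>
        match PySem.List.pyGet? ck j with
        | none => ck      -- IndexError (ck_list[want_dict[pro]] out of range); outside Pre_
        | some v =>
          if v > 0 then innerA discount wd (ck.set j.toNat (v - 1)) rest  -- j ≥ 0 by construction
          else ck         -- 'else: break'

-- A's 'while idx + 10 <= len(discount)' loop
def outerA (discount : List String) (wd : PySem.Dict String Int) (number : List Int)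
    (idx : Nat) (answer : Int) : Int :=
  if _h : idx + 10 ≤ discount.length then
    let ck := innerA discount wd number (PySem.List.pyRange idx (idx + 10) 1)
    outerA discount wd number (idx + 1) (if ck.sum = 0 then answer + 1 else answer)
  else answer
termination_by discount.length - idx
decreasing_by omega

def solution (want : List String) (number : List Int) (discount : List String) : Int :=
  outerA discount (wantDict want) number 0 0

-- ===== PORT B =====

-- B's inner 'while r < n' extension loop
def extendB (discount : List String) (pos : PySem.Dict String Int)
    (rem : List Int) (r : Nat) : List Int × Nat :=
  if h : r < discount.length then
    match pos.get? discount[r] with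
    | none => (rem, r)    -- 'j is None: break'
    | some j =>
      match PySem.List.pyGet? rem j with
      | none => (rem, r)  -- IndexError on rem[j]; outside Pre_
      | some v =>
        if v ≤ 0 then (rem, r)  -- 'rem[j] <= 0: break'
        else extendB discount pos (rem.set j.toNat (v - 1)) (r + 1)  -- j ≥ 0 by construction
  else (rem, r)
termination_by discount.length - r
decreasing_by omega

-- B's 'for l in range(n - 9)' loop, state (rem, r, answer)
def outerB (discount : List String) (pos : PySem.Dict String Int) (S : Int)
    (rem : List Int) (r : Nat) (answer : Int) (l : Nat) : Int :=
  if _h : l + 10 ≤ discount.length then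
    let r0 := if r < l then l else r
    let t := extendB discount pos rem r0
    let answer1 := if ((min (t.2 - l) 10 : Nat) : Int) = S then answer + 1 else answer
    let rem2 :=
      if l < t.2 then
        match pos.get? (discount.getD l "") with   -- discount[l], in range: l < len(discount)
        | none => t.1      -- KeyError; unreachable: discount[l] was consumed, so it is a key
        | some j =>
          match PySem.List.pyGet? t.1 j with
          | none => t.1    -- IndexError; outside Pre_
          | some v => t.1.set j.toNat (v + 1)
      else t.1
    outerB discount pos S rem2 t.2 answer1 (l + 1)
  else answer
termination_by discount.length - l
decreasing_by omega

def solution_alt (want : List String) (number : List Int) (discount : List String) : Int :=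
  outerB discount (wantDict want) number.sum number 0 0 0

-- ===== PRECONDITION & SPEC =====

-- Pre_ excludes inputs where ck_list[want_dict[pro]] can be indexed out of range
-- (len(number) < len(want) with at least ten discount days), on which A may raise IndexError.
def Pre_solution (want : List String) (number : List Int) (discount : List String) : Prop :=
  discount.length < 10 ∨ want.length ≤ number.length
instance (want : List String) (number : List Int) (discount : List String) :
    Decidable (Pre_solution want number discount) := by unfold Pre_solution; infer_instance

def pvWitness_solution : List String × List Int × List String :=
  (["a", "b"], [7, 3], ["a", "a", "b", "a", "a", "b", "a", "a", "b", "a", "a", "x"])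

def Spec_solution (want : List String) (number : List Int) (discount : List String) (out : Int) : Prop := out = solution_alt want number discount
instance (want : List String) (number : List Int) (discount : List String) (out : Int) : Decidable (Spec_solution want number discount out) := by unfold Spec_solution; infer_instance

-- ===== CLAIM (what is proved, stated in full; the proofs are below) =====
def Claim_equal_solution : Prop := ∀ (want : List String) (number : List Int) (discount : List String), Dom_solution want number discount → Pre_solution want number discount → Spec_solution want number discount (solution want number discount)

-- ===== LEMMAS AND PROOFS =====

-- greedy consumption of a list of products against down-counters ck:
-- (number of items consumed before the first failure, final counters)
def greedy (wd : PySem.Dict String Int) (ck : List Int) : List String → Nat × List Int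
  | [] => (0, ck)
  | p :: rest =>
    match wd.get? p with
    | none => (0, ck)
    | some j =>
      match PySem.List.pyGet? ck j with
      | none => (0, ck)
      | some v =>
        if v > 0 then
          let t := greedy wd (ck.set j.toNat (v - 1)) rest
          (t.1 + 1, t.2)
        else (0, ck)

-- every value stored by wantDict is a nonnegative index < len(want)
theorem foldl_insert_bounds (B : Int) (l : List (Int × String)) (d : PySem.Dict String Int)
    (hd : ∀ k j, d.get? k = some j → 0 ≤ j ∧ j < B)
    (hl : ∀ p ∈ l, 0 ≤ p.1 ∧ p.1 < B) :
    ∀ k j, (l.foldl (fun d p => d.insert p.2 p.1) d).get? k = some j → 0 ≤ j ∧ j < B := by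
  induction l generalizing d with
  | nil => exact hd
  | cons q t ih =>
    intro k j h
    refine ih _ ?_ (fun p hp => hl p (List.mem_cons_of_mem _ hp)) k j h
    intro k' j' h'
    rw [PySem.Dict.get?_insert] at h'
    split at h'
    · cases h'
      exact hl q (List.mem_cons_self)
    · exact hd k' j' h'

theorem wantDict_bounds (want : List String) (p : String) (j : Int)
    (h : (wantDict want).get? p = some j) : 0 ≤ j ∧ j.toNat < want.length := by
  have hb := foldl_insert_bounds (want.length : Int) (PySem.List.enumerate want 0)
    PySem.Dict.empty (by simp [PySem.Dict.get?_empty])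
    (by
      intro q hq
      have : q.1 ∈ (PySem.List.enumerate want 0).map (·.1) := List.mem_map_of_mem hq
      rw [PySem.List.map_fst_enumerate] at this
      have := (PySem.List.mem_pyRange_one).mp this
      omega)
    p j h
  omega

theorem greedy_len (wd : PySem.Dict String Int) (xs : List String) (ck : List Int) :
    (greedy wd ck xs).2.length = ck.length := by
  induction xs generalizing ck with
  | nil => simp [greedy]
  | cons p rest ih =>
    simp only [greedy]
    cases hw : wd.get? p with
    | none => simp
    | some j =>
      cases hg : PySem.List.pyGet? ck j with
      | none => simp [hg]
      | some v =>
        simp only [hg]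
        by_cases hv : v > 0
        · simp only [hv, if_true]
          rw [ih]; simp
        · simp [hv]

theorem greedy_le_length (wd : PySem.Dict String Int) (xs : List String) (ck : List Int) :
    (greedy wd ck xs).1 ≤ xs.length := by
  induction xs generalizing ck with
  | nil => simp [greedy]
  | cons p rest ih =>
    simp only [greedy]
    cases hw : wd.get? p with
    | none => simp
    | some j =>
      cases hg : PySem.List.pyGet? ck j with
      | none => simp [hg]
      | some v =>
        simp only [hg]
        by_cases hv : v > 0
        · simp only [hv, if_true, List.length_cons]
          have := ih (ck.set j.toNat (v - 1))
          omega
        · simp [hv]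

theorem sum_set_int (l : List Int) (n : Nat) (a : Int) (h : n < l.length) :
    (l.set n a).sum = l.sum - l[n] + a := by
  induction l generalizing n with
  | nil => simp at h
  | cons x xs ih =>
    cases n with
    | zero => simp [List.set]; ring
    | succ m =>
      have hm : m < xs.length := by simpa using h
      simp only [List.set, List.sum_cons, List.getElem_cons_succ, ih m hm]
      ring

theorem greedy_sum (wd : PySem.Dict String Int)
    (Hwd : ∀ p j, wd.get? p = some j → 0 ≤ j)
    (xs : List String) (ck : List Int) :
    ((greedy wd ck xs).2).sum = ck.sum - (greedy wd ck xs).1 := by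
  induction xs generalizing ck with
  | nil => simp [greedy]
  | cons p rest ih =>
    simp only [greedy]
    cases hw : wd.get? p with
    | none => simp
    | some j =>
      cases hg : PySem.List.pyGet? ck j with
      | none => simp [hg]
      | some v =>
        simp only [hg]
        by_cases hv : v > 0
        · simp only [hv, if_true]
          have hj0 := Hwd p j hw
          rw [PySem.List.pyGet?_of_nonneg ck hj0] at hg
          have hlt : j.toNat < ck.length := (List.getElem?_eq_some_iff.mp hg).1
          have hve : ck[j.toNat] = v := (List.getElem?_eq_some_iff.mp hg).2
          rw [ih]
          rw [sum_set_int ck j.toNat (v - 1) hlt, hve]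
          push_cast
          ring
        · simp [hv]

theorem greedy_zero (wd : PySem.Dict String Int) (xs : List String) (ck : List Int)
    (h : (greedy wd ck xs).1 = 0) : greedy wd ck xs = (0, ck) := by
  cases xs with
  | nil => rfl
  | cons p rest =>
    simp only [greedy] at h ⊢
    cases hw : wd.get? p with
    | none => simp
    | some j =>
      rw [hw] at h
      cases hg : PySem.List.pyGet? ck j with
      | none => simp [hg]
      | some v =>
        simp only [hg] at h ⊢
        by_cases hv : v > 0
        · simp [hv] at h
        · simp [hv]

theorem greedy_take_ge (wd : PySem.Dict String Int) (xs : List String) (ck : List Int)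
    (k : Nat) (h : (greedy wd ck xs).1 ≤ k) :
    greedy wd ck (xs.take k) = greedy wd ck xs := by
  induction xs generalizing ck k with
  | nil => simp
  | cons p rest ih =>
    cases k with
    | zero =>
      have h0 : (greedy wd ck (p :: rest)).1 = 0 := Nat.le_zero.mp h
      rw [greedy_zero wd (p :: rest) ck h0]
      simp [greedy]
    | succ m =>
      simp only [List.take_succ_cons]
      simp only [greedy] at h ⊢
      cases hw : wd.get? p with
      | none => rfl
      | some j =>
        rw [hw] at h
        cases hg : PySem.List.pyGet? ck j with
        | none => simp [hg]
        | some v =>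
          simp only [hg] at h ⊢
          by_cases hv : v > 0
          · simp only [hv, if_true] at h ⊢
            rw [ih _ _ (by omega)]
          · simp [hv]

theorem greedy_take_le (wd : PySem.Dict String Int) (xs : List String) (ck : List Int)
    (k : Nat) (h : k ≤ (greedy wd ck xs).1) :
    (greedy wd ck (xs.take k)).1 = k := by
  induction xs generalizing ck k with
  | nil => simp [greedy] at h ⊢; omega
  | cons p rest ih =>
    cases k with
    | zero => simp [greedy]
    | succ m =>
      simp only [List.take_succ_cons]
      simp only [greedy] at h ⊢
      cases hw : wd.get? p with
      | none => rw [hw] at h; simp at h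
      | some j =>
        rw [hw] at h
        cases hg : PySem.List.pyGet? ck j with
        | none => simp [hg] at h
        | some v =>
          simp only [hg] at h ⊢
          by_cases hv : v > 0
          · simp only [hv, if_true] at h ⊢
            rw [ih _ _ (by omega)]
          · simp [hv] at h

theorem greedy_split (wd : PySem.Dict String Int) (ys zs : List String) (ck : List Int)
    (h : (greedy wd ck ys).1 = ys.length) :
    greedy wd ck (ys ++ zs) =
      ((greedy wd (greedy wd ck ys).2 zs).1 + ys.length, (greedy wd (greedy wd ck ys).2 zs).2) := by
  induction ys generalizing ck with
  | nil => simp [greedy]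
  | cons p rest ih =>
    simp only [List.cons_append]
    simp only [greedy] at h ⊢
    cases hw : wd.get? p with
    | none => rw [hw] at h; simp at h
    | some j =>
      rw [hw] at h
      cases hg : PySem.List.pyGet? ck j with
      | none => simp [hg] at h
      | some v =>
        simp only [hg] at h ⊢
        by_cases hv : v > 0
        · simp only [hv, if_true] at h ⊢
          have ht : (greedy wd (ck.set j.toNat (v - 1)) rest).1 = rest.length := by
            simp at h; omega
          rw [ih _ ht]
          simp
          omega
        · simp [hv] at h

theorem getD_set_self (l : List Int) (n : Nat) (a : Int) (h : n < l.length) :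
    (l.set n a).getD n 0 = a := by
  simp [List.getD_eq_getElem?_getD, h]

theorem getD_set_ne (l : List Int) (n m : Nat) (a : Int) (h : m ≠ n) :
    (l.set n a).getD m 0 = l.getD m 0 := by
  simp [List.getD_eq_getElem?_getD, Ne.symm h]

theorem set_getD_self (l : List Int) (n : Nat) (h : n < l.length) :
    l.set n (l.getD n 0) = l := by
  rw [List.getD_eq_getElem _ _ h]
  exact List.set_getElem_self h

-- giving back one unit at index j: if the smaller counters fully consume xs, so do
-- the larger ones, and the final counters again differ by one at j
theorem greedy_comm (wd : PySem.Dict String Int)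
    (Hwd : ∀ p j, wd.get? p = some j → 0 ≤ j)
    (xs : List String) (big : List Int) (j : Nat) (hj : j < big.length)
    (h : (greedy wd (big.set j (big.getD j 0 - 1)) xs).1 = xs.length) :
    (greedy wd big xs).1 = xs.length ∧
    (greedy wd big xs).2 =
      ((greedy wd (big.set j (big.getD j 0 - 1)) xs).2).set j
        (((greedy wd (big.set j (big.getD j 0 - 1)) xs).2).getD j 0 + 1) := by
  induction xs generalizing big with
  | nil =>
    refine ⟨by simp [greedy], ?_⟩
    simp only [greedy]
    rw [getD_set_self big j _ hj, List.set_set, sub_add_cancel, set_getD_self big j hj]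
  | cons p rest ih =>
    simp only [greedy] at h ⊢
    cases hw : wd.get? p with
    | none => rw [hw] at h; simp at h
    | some j2 =>
      rw [hw] at h
      dsimp only at h ⊢
      have hj2 : 0 ≤ j2 := Hwd p j2 hw
      cases hgS : PySem.List.pyGet? (big.set j (big.getD j 0 - 1)) j2 with
      | none => rw [hgS] at h; simp at h
      | some w =>
        rw [hgS] at h
        by_cases hvS : w > 0
        · simp only [hvS, if_true] at h
          rw [PySem.List.pyGet?_of_nonneg _ hj2] at hgS
          have hlt : j2.toNat < big.length :=
            by have := (List.getElem?_eq_some_iff.mp hgS).1; simpa using this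
          have hwe : (big.set j (big.getD j 0 - 1)).getD j2.toNat 0 = w := by
            rw [List.getD_eq_getElem?_getD, hgS]; rfl
          by_cases hjj : j2.toNat = j
          · -- consumed at the returned index
            subst hjj
            have hw2 : (big.set j2.toNat (big.getD j2.toNat 0 - 1)).getD j2.toNat 0
                = big.getD j2.toNat 0 - 1 := getD_set_self _ _ _ hj
            have hwval : w = big.getD j2.toNat 0 - 1 := by rw [← hwe, hw2]
            have hgB : PySem.List.pyGet? big j2 = some (big.getD j2.toNat 0) := by
              rw [PySem.List.pyGet?_of_nonneg _ hj2, List.getElem?_eq_some_iff]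
              exact ⟨hlt, (List.getD_eq_getElem _ _ hlt).symm⟩
            rw [hgB]
            have hvB : big.getD j2.toNat 0 > 0 := by omega
            simp only [hvB, if_true, hvS]
            have ihh := ih (big.set j2.toNat (big.getD j2.toNat 0 - 1))
              (by simpa using hj)
              (by
                have : (big.set j2.toNat (big.getD j2.toNat 0 - 1)).set j2.toNat
                    ((big.set j2.toNat (big.getD j2.toNat 0 - 1)).getD j2.toNat 0 - 1)
                    = (big.set j2.toNat (big.getD j2.toNat 0 - 1)).set j2.toNat (w - 1) := by
                  rw [hw2]; rw [hwval]
                rw [this]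
                simpa using h)
            refine ⟨?_, ?_⟩
            · simp only [ihh.1]; simp
            · rw [hwval]
              have h2 := ihh.2
              rw [hw2] at h2
              exact h2
          · -- consumed elsewhere
            have hwB : (big.set j (big.getD j 0 - 1)).getD j2.toNat 0 = big.getD j2.toNat 0 :=
              getD_set_ne _ _ _ _ hjj
            have hwval : w = big.getD j2.toNat 0 := by rw [← hwe, hwB]
            have hgB : PySem.List.pyGet? big j2 = some (big.getD j2.toNat 0) := by
              rw [PySem.List.pyGet?_of_nonneg _ hj2, List.getElem?_eq_some_iff]
              exact ⟨hlt, (List.getD_eq_getElem _ _ hlt).symm⟩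
            rw [hgB]
            have hvB : big.getD j2.toNat 0 > 0 := by omega
            simp only [hvB, if_true, hvS]
            have hcomm : (big.set j (big.getD j 0 - 1)).set j2.toNat (w - 1)
                = (big.set j2.toNat (big.getD j2.toNat 0 - 1)).set j
                    ((big.set j2.toNat (big.getD j2.toNat 0 - 1)).getD j 0 - 1) := by
              rw [getD_set_ne _ _ _ _ (fun he => hjj he.symm), hwval]
              exact List.set_comm _ _ (fun he => hjj he.symm)
            have ihh := ih (big.set j2.toNat (big.getD j2.toNat 0 - 1))
              (by simpa using hj)
              (by rw [← hcomm]; simpa using h)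
            refine ⟨?_, ?_⟩
            · simp only [ihh.1]; simp
            · have h2 := ihh.2
              rw [← hcomm] at h2
              exact h2
        · simp [hvS] at h

-- the per-start-day count both loops compute
def specCount (wd : PySem.Dict String Int) (number : List Int) (discount : List String)
    (l : Nat) : Int :=
  if _h : l + 10 ≤ discount.length then
    (if (((greedy wd number ((discount.drop l).take 10)).1 : Int) = number.sum) then 1 else 0)
      + specCount wd number discount (l + 1)
  else 0
termination_by discount.length - l
decreasing_by omega

theorem innerA_eq_greedy (discount : List String) (wd : PySem.Dict String Int)
    (k idx : Nat) (ck : List Int) (h : idx + k ≤ discount.length) :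
    innerA discount wd ck (PySem.List.pyRange (idx : Int) (((idx + k : Nat)) : Int) 1)
      = (greedy wd ck ((discount.drop idx).take k)).2 := by
  induction k generalizing idx ck with
  | zero =>
    rw [PySem.List.pyRange_one_eq_nil (by push_cast; omega)]
    simp [innerA, greedy]
  | succ k ih =>
    have hidx : idx < discount.length := by omega
    rw [PySem.List.pyRange_one_cons (by push_cast; omega)]
    rw [List.drop_eq_getElem_cons hidx, List.take_succ_cons]
    simp only [innerA, greedy]
    rw [PySem.List.pyGet?_natCast, List.getElem?_eq_getElem hidx]
    dsimp only
    cases hw : wd.get? discount[idx] with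
    | none => rfl
    | some j =>
      cases hg : PySem.List.pyGet? ck j with
      | none => simp [hg]
      | some v =>
        simp only [hg]
        by_cases hv : v > 0
        · simp only [hv, if_true]
          have e2 : PySem.List.pyRange ((idx : Int) + 1) ((idx + (k + 1) : Nat) : Int) 1
              = PySem.List.pyRange (((idx + 1 : Nat) : Int)) ((((idx + 1) + k : Nat) : Int)) 1 := by
            push_cast; ring_nf
          rw [e2, ih (idx + 1) _ (by omega)]
        · simp [hv]

theorem outerA_eq_specCount (discount : List String) (wd : PySem.Dict String Int)
    (number : List Int)
    (Hwd : ∀ p j, wd.get? p = some j → 0 ≤ j)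
    (idx : Nat) (answer : Int) :
    outerA discount wd number idx answer = answer + specCount wd number discount idx := by
  suffices H : ∀ fuel idx answer, discount.length ≤ idx + fuel →
      outerA discount wd number idx answer = answer + specCount wd number discount idx by
    exact H discount.length idx answer (by omega)
  intro fuel
  induction fuel with
  | zero =>
    intro idx answer hf
    rw [outerA, specCount]
    rw [dif_neg (by omega), dif_neg (by omega)]
    omega
  | succ f ih =>
    intro idx answer hf
    rw [outerA, specCount]
    by_cases hl : idx + 10 ≤ discount.length
    · rw [dif_pos hl, dif_pos hl]
      rw [ih (idx + 1) _ (by omega)]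
      have hsum : (innerA discount wd number (PySem.List.pyRange (idx : Int) ((idx : Int) + 10) 1)).sum
          = number.sum - ((greedy wd number ((discount.drop idx).take 10)).1 : Int) := by
        have e : ((idx : Int) + 10) = ((idx + 10 : Nat) : Int) := by push_cast; ring
        rw [e, innerA_eq_greedy discount wd 10 idx number hl]
        exact greedy_sum wd Hwd _ _
      have hcond : ((innerA discount wd number (PySem.List.pyRange (idx : Int) ((idx : Int) + 10) 1)).sum = 0)
          ↔ (((greedy wd number ((discount.drop idx).take 10)).1 : Int) = number.sum) := by
        rw [hsum]; omega
      by_cases hc : ((greedy wd number ((discount.drop idx).take 10)).1 : Int) = number.sum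
      · rw [if_pos (hcond.mpr hc), if_pos hc]; ring
      · rw [if_neg (fun hx => hc (hcond.mp hx)), if_neg hc]; ring
    · rw [dif_neg hl, dif_neg hl]
      omega

theorem extendB_eq_greedy (discount : List String) (pos : PySem.Dict String Int)
    (rem : List Int) (r : Nat) :
    extendB discount pos rem r
      = ((greedy pos rem (discount.drop r)).2, r + (greedy pos rem (discount.drop r)).1) := by
  suffices H : ∀ fuel rem r, discount.length ≤ r + fuel →
      extendB discount pos rem r
        = ((greedy pos rem (discount.drop r)).2, r + (greedy pos rem (discount.drop r)).1) by
    exact H discount.length rem r (by omega)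
  intro fuel
  induction fuel with
  | zero =>
    intro rem r hf
    rw [extendB, dif_neg (by omega)]
    rw [List.drop_eq_nil_of_le (by omega)]
    simp [greedy]
  | succ f ih =>
    intro rem r hf
    rw [extendB]
    by_cases hr : r < discount.length
    · rw [dif_pos hr]
      rw [List.drop_eq_getElem_cons hr]
      simp only [greedy]
      cases hw : pos.get? discount[r] with
      | none => simp
      | some j =>
        cases hg : PySem.List.pyGet? rem j with
        | none => simp [hg]
        | some v =>
          simp only [hg]
          by_cases hv : v ≤ 0
          · rw [if_pos hv, if_neg (by omega)]
            simp
          · rw [if_neg hv, if_pos (by omega)]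
            rw [ih _ (r + 1) (by omega)]
            simp
            omega
    · rw [dif_neg hr]
      rw [List.drop_eq_nil_of_le (by omega)]
      simp [greedy]

theorem outerB_eq_specCount (discount : List String) (wd : PySem.Dict String Int)
    (number : List Int)
    (Hwd : ∀ p j, wd.get? p = some j → 0 ≤ j ∧ j.toNat < number.length)
    (l r : Nat) (rem : List Int) (answer : Int)
    (hr : r ≤ discount.length)
    (hfull : (greedy wd number ((discount.drop l).take (max r l - l))).1 = max r l - l)
    (hrem : rem = (greedy wd number ((discount.drop l).take (max r l - l))).2) :
    outerB discount wd number.sum rem r answer l = answer + specCount wd number discount l := by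
  suffices H : ∀ fuel l r rem answer, discount.length ≤ l + fuel → r ≤ discount.length →
      (greedy wd number ((discount.drop l).take (max r l - l))).1 = max r l - l →
      rem = (greedy wd number ((discount.drop l).take (max r l - l))).2 →
      outerB discount wd number.sum rem r answer l = answer + specCount wd number discount l by
    exact H discount.length l r rem answer (by omega) hr hfull hrem
  clear hr hfull hrem
  intro fuel
  induction fuel with
  | zero =>
    intro l r rem answer hf hr hfull hrem
    rw [outerB, specCount, dif_neg (by omega), dif_neg (by omega)]
    omega
  | succ f ih =>
    intro l r rem answer hf hr hfull hrem
    rw [outerB, specCount]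
    by_cases hl : l + 10 ≤ discount.length
    · rw [dif_pos hl, dif_pos hl]
      have hmax : (if r < l then l else r) = max r l := by split <;> omega
      rw [hmax]
      dsimp only
      rw [extendB_eq_greedy discount wd rem (max r l)]
      dsimp only
      -- abbreviations
      have hl0 : l ≤ max r l := Nat.le_max_right r l
      have hr0n : max r l ≤ discount.length := by omega
      have hseglen : ((discount.drop l).take (max r l - l)).length = max r l - l := by
        simp [List.length_take, List.length_drop]; omega
      have hsplit : ((discount.drop l).take (max r l - l)) ++ discount.drop (max r l) = discount.drop l := by
        have h2 : discount.drop (max r l) = (discount.drop l).drop (max r l - l) := by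
          rw [List.drop_drop]; congr 1; omega
        rw [h2, List.take_append_drop]
      have hsp := greedy_split wd ((discount.drop l).take (max r l - l)) (discount.drop (max r l)) number
        (by rw [hseglen]; exact hfull)
      rw [hsplit, ← hrem] at hsp
      have hD1 : (greedy wd number (discount.drop l)).1
          = (greedy wd rem (discount.drop (max r l))).1 + (max r l - l) := by
        rw [hsp, hseglen]
      have hD2 : (greedy wd number (discount.drop l)).2
          = (greedy wd rem (discount.drop (max r l))).2 := by rw [hsp]
      have hdle : (greedy wd rem (discount.drop (max r l))).1 ≤ discount.length - max r l := by
        have := greedy_le_length wd (discount.drop (max r l)) rem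
        simp [List.length_drop] at this; omega
      -- window condition
      have hwin : (greedy wd number ((discount.drop l).take 10)).1
          = min (greedy wd number (discount.drop l)).1 10 := by
        rcases Nat.le_total (greedy wd number (discount.drop l)).1 10 with hle | hge
        · rw [greedy_take_ge wd (discount.drop l) number 10 hle]; omega
        · rw [greedy_take_le wd (discount.drop l) number 10 hge]; omega
      have hmin : min (max r l + (greedy wd rem (discount.drop (max r l))).1 - l) 10
          = (greedy wd number ((discount.drop l).take 10)).1 := by
        rw [hwin]; omega
      have hcond : (((min (max r l + (greedy wd rem (discount.drop (max r l))).1 - l) 10 : Nat) : Int) = number.sum)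
          ↔ (((greedy wd number ((discount.drop l).take 10)).1 : Int) = number.sum) := by
        rw [hmin]
      by_cases hpos : l < max r l + (greedy wd rem (discount.drop (max r l))).1
      · -- at least one item consumed: shrink gives one unit back at discount[l]'s index
        rw [if_pos hpos]
        have hr1n : max r l + (greedy wd rem (discount.drop (max r l))).1 ≤ discount.length := by omega
        have hfull1 : greedy wd number ((discount.drop l).take (max r l + (greedy wd rem (discount.drop (max r l))).1 - l))
            = greedy wd number (discount.drop l) := by
          apply greedy_take_ge; omega
        have hln : l < discount.length := by omega
        have htake : (discount.drop l).take (max r l + (greedy wd rem (discount.drop (max r l))).1 - l)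
            = discount[l] :: ((discount.drop (l+1)).take (max r l + (greedy wd rem (discount.drop (max r l))).1 - (l+1))) := by
          rw [List.drop_eq_getElem_cons hln]
          have e : max r l + (greedy wd rem (discount.drop (max r l))).1 - l
              = (max r l + (greedy wd rem (discount.drop (max r l))).1 - (l+1)) + 1 := by omega
          rw [e, List.take_succ_cons]
        rw [htake] at hfull1
        have hf1 : (greedy wd number (discount[l] :: ((discount.drop (l+1)).take (max r l + (greedy wd rem (discount.drop (max r l))).1 - (l+1))))).1
            = max r l + (greedy wd rem (discount.drop (max r l))).1 - l := by rw [hfull1, hD1]; omega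
        have hf2 : (greedy wd number (discount[l] :: ((discount.drop (l+1)).take (max r l + (greedy wd rem (discount.drop (max r l))).1 - (l+1))))).2
            = (greedy wd rem (discount.drop (max r l))).2 := by rw [hfull1, hD2]
        have hgd : discount.getD l "" = discount[l] := List.getD_eq_getElem _ _ hln
        rw [hgd]
        simp only [greedy] at hf1 hf2
        cases hw : wd.get? discount[l] with
        | none => rw [hw] at hf1; simp at hf1; omega
        | some j =>
          rw [hw] at hf1 hf2
          dsimp only at hf1 hf2 ⊢
          cases hg : PySem.List.pyGet? number j with
          | none => rw [hg] at hf1; simp at hf1; omega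
          | some v =>
            rw [hg] at hf1 hf2
            by_cases hv : v > 0
            · simp only [hv, if_true] at hf1 hf2
              have hjb := Hwd _ _ hw
              have hgel : number.getD j.toNat 0 = v := by
                rw [PySem.List.pyGet?_of_nonneg _ hjb.1] at hg
                rw [List.getD_eq_getElem?_getD, hg]; rfl
              have htllen : ((discount.drop (l+1)).take (max r l + (greedy wd rem (discount.drop (max r l))).1 - (l+1))).length
                  = max r l + (greedy wd rem (discount.drop (max r l))).1 - (l+1) := by
                simp [List.length_take, List.length_drop]; omega
              have hsm : (greedy wd (number.set j.toNat (v - 1)) ((discount.drop (l+1)).take (max r l + (greedy wd rem (discount.drop (max r l))).1 - (l+1)))).1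
                  = ((discount.drop (l+1)).take (max r l + (greedy wd rem (discount.drop (max r l))).1 - (l+1))).length := by
                rw [htllen]; omega
              have hcm := greedy_comm wd (fun p j h => (Hwd p j h).1)
                ((discount.drop (l+1)).take (max r l + (greedy wd rem (discount.drop (max r l))).1 - (l+1)))
                number j.toNat hjb.2 (by rw [hgel]; exact hsm)
              have hlen1 : (greedy wd rem (discount.drop (max r l))).2.length = number.length := by
                rw [greedy_len, hrem, greedy_len]
              have hjl : j.toNat < (greedy wd rem (discount.drop (max r l))).2.length := by
                rw [hlen1]; exact hjb.2
              have hgr : PySem.List.pyGet? (greedy wd rem (discount.drop (max r l))).2 j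
                  = some ((greedy wd rem (discount.drop (max r l))).2.getD j.toNat 0) := by
                rw [PySem.List.pyGet?_of_nonneg _ hjb.1, List.getElem?_eq_getElem hjl,
                  List.getD_eq_getElem _ _ hjl]
              rw [hgr]
              dsimp only
              rw [hgel] at hcm
              rw [hf2] at hcm
              have hmax1 : max (max r l + (greedy wd rem (discount.drop (max r l))).1) (l + 1)
                  = max r l + (greedy wd rem (discount.drop (max r l))).1 := by omega
              rw [ih (l + 1) (max r l + (greedy wd rem (discount.drop (max r l))).1) _ _
                (by omega) hr1n
                (by rw [hmax1, hcm.1, htllen])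
                (by rw [hmax1]; exact hcm.2.symm)]
              by_cases hc : ((greedy wd number ((discount.drop l).take 10)).1 : Int) = number.sum
              · rw [if_pos (hcond.mpr hc), if_pos hc]; ring
              · rw [if_neg (fun hx => hc (hcond.mp hx)), if_neg hc]; ring
            · simp [hv] at hf1; omega
      · -- nothing was consumed from l: the segment is empty and rem is number
        rw [if_neg hpos]
        have hreq : max r l + (greedy wd rem (discount.drop (max r l))).1 = l := by omega
        have hD0 : (greedy wd number (discount.drop l)).1 = 0 := by omega
        have hzero := greedy_zero wd (discount.drop l) number hD0
        have hrem1 : (greedy wd rem (discount.drop (max r l))).2 = number := by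
          rw [← hD2, hzero]
        rw [hrem1]
        rw [ih (l + 1) (max r l + (greedy wd rem (discount.drop (max r l))).1) number _
          (by omega) (by omega)
          (by have e : max (max r l + (greedy wd rem (discount.drop (max r l))).1) (l+1) = l + 1 := by omega
              rw [e]; simp [greedy])
          (by have e : max (max r l + (greedy wd rem (discount.drop (max r l))).1) (l+1) = l + 1 := by omega
              rw [e]; simp [greedy])]
        by_cases hc : ((greedy wd number ((discount.drop l).take 10)).1 : Int) = number.sum
        · rw [if_pos (hcond.mpr hc), if_pos hc]; ring
        · rw [if_neg (fun hx => hc (hcond.mp hx)), if_neg hc]; ring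
    · rw [dif_neg hl, dif_neg hl]
      omega

-- ===== VERDICT (by name: the statement is the Claim_ definition above) =====
theorem solution_spec : Claim_equal_solution := by
  intro want number discount _hdom hpre
  unfold Spec_solution Pre_solution at *
  unfold solution solution_alt
  by_cases hn : discount.length < 10
  · rw [outerA, outerB, dif_neg (by omega), dif_neg (by omega)]
  · have hlen : want.length ≤ number.length := by
      rcases hpre with h | h
      · omega
      · exact h
    rw [outerA_eq_specCount discount (wantDict want) number
      (fun p j h => (wantDict_bounds want p j h).1) 0 0]
    rw [outerB_eq_specCount discount (wantDict want) number
      (fun p j h => ⟨(wantDict_bounds want p j h).1,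
        lt_of_lt_of_le (wantDict_bounds want p j h).2 hlen⟩)
      0 0 number 0 (by omega) (by simp [greedy]) (by simp [greedy])]
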